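-- pv_equiv track=rewrite | github.com/muqingliu/trade_tool | paint_equity/excel_paint.py | get_total_col_title
-- ===== SOURCE A (Python) =====
-- def get_total_col_title(file_name):
--     index = file_name.rfind(".")
--     if -1 != index:
--         file_name = file_name[0:index]
--
--     title_str = ""
--     list_str = file_name.split('_')
--     count = len(list_str)
--     for i in range(0, count):
--         try:
--             int(list_str[i])
--         except Exception as e:
--             title_str = ""
--             continue
--
--         title_str = title_str + "_" + list_str[i]
--
--     if len(title_str) == 0:
--         return "equity"
--
--     return title_str
-- ===== SOURCE B (Python) =====
-- def get_total_col_title(file_name):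
--     index = file_name.rfind(".")
--     if index != -1:
--         file_name = file_name[0:index]
--
--     collected = []
--     for part in reversed(file_name.split('_')):
--         try:
--             int(part)
--         except Exception:
--             break
--         collected.append(part)
--
--     if not collected:
--         return "equity"
--     return ''.join('_' + p for p in reversed(collected))
-- ===== Notes on version B (the rewrite author's own statement) =====
-- stated objective: alternative
-- what changed: Instead of A's forward pass over all parts that resets the accumulated title on every non-numeric part, B scans the parts in reverse, collecting the maximal trailing run of int()-parseable parts and breaking at the first failure, then joins that run.
import Mathlib
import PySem

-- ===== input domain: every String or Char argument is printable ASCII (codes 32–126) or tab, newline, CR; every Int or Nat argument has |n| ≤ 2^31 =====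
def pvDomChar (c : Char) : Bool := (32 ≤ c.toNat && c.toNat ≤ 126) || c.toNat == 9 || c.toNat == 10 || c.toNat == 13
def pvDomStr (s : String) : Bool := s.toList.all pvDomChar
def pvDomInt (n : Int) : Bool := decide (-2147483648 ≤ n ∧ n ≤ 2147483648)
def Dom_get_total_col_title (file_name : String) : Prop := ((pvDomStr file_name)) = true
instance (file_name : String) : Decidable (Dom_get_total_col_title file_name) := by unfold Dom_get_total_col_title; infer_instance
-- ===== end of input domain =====

-- B replaces A's forward scan with reset-on-nonnumeric by a reverse scan that collects the
-- maximal trailing run of int()-parseable parts and stops early (objective: alternative).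


-- ===== PORT A =====
-- loop body: on int() failure title_str is reset to "", else "_" + part is appended
def pvAStep (title : List Char) (p : List Char) : List Char :=
  match PySem.Int.ofChars? p with
  | none => []
  | some _ => title ++ ('_' :: p)

def get_total_col_title (file_name : String) : String :=
  let cs := file_name.toList
  let index := PySem.Chars.rfind cs ['.']
  let cs := if (-1 : Int) ≠ index then PySem.Chars.slice cs (some 0) (some index) else cs
  let list_str := PySem.Chars.splitOn cs ['_']
  let title_str := list_str.foldl pvAStep []
  if title_str.length = 0 then "equity" else String.mk title_str

-- ===== PORT B =====
-- reverse scan: collect while int() succeeds, break at the first failure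
def pvBLoop : List (List Char) → List (List Char) → List (List Char)
  | [], coll => coll
  | p :: rest, coll =>
    match PySem.Int.ofChars? p with
    | none => coll
    | some _ => pvBLoop rest (coll ++ [p])

def get_total_col_title_alt (file_name : String) : String :=
  let cs := file_name.toList
  let index := PySem.Chars.rfind cs ['.']
  let stem := if index ≠ (-1 : Int) then PySem.Chars.slice cs (some 0) (some index) else cs
  let collected := pvBLoop (PySem.Chars.splitOn stem ['_']).reverse []
  if collected = [] then "equity"
  else String.mk (PySem.Chars.join [] (collected.reverse.map (fun p => '_' :: p)))

-- ===== PRECONDITION & SPEC =====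
def Spec_get_total_col_title (file_name : String) (out : String) : Prop := out = get_total_col_title_alt file_name
instance (file_name : String) (out : String) : Decidable (Spec_get_total_col_title file_name out) := by unfold Spec_get_total_col_title; infer_instance

-- ===== CLAIM (what is proved, stated in full; the proofs are below) =====
def Claim_equal_get_total_col_title : Prop := ∀ (file_name : String), Dom_get_total_col_title file_name → Spec_get_total_col_title file_name (get_total_col_title file_name)

-- ===== LEMMAS AND PROOFS =====

def pvNum (p : List Char) : Bool := (PySem.Int.ofChars? p).isSome

def pvRender (run : List (List Char)) : List Char := (run.map (fun p => '_' :: p)).flatten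

lemma pvJoin_nil (ps : List (List Char)) : PySem.Chars.join [] ps = ps.flatten := by
  show List.intercalate [] ps = ps.flatten
  induction ps with
  | nil => simp [List.intercalate]
  | cons p rest ih =>
    cases rest with
    | nil => simp [List.intercalate]
    | cons q r => simp_all [List.intercalate, List.intersperse]

lemma pvRender_nil_iff (rs : List (List Char)) : pvRender rs = [] ↔ rs = [] := by
  cases rs <;> simp [pvRender]

lemma pvNum_some (p : List Char) (h : pvNum p = true) : ∃ n, PySem.Int.ofChars? p = some n :=
  Option.isSome_iff_exists.mp h

lemma pvNum_none (p : List Char) (h : pvNum p = false) : PySem.Int.ofChars? p = none := by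
  cases he : PySem.Int.ofChars? p with
  | none => rfl
  | some v => simp [pvNum, he] at h

lemma pvBLoop_eq (qs : List (List Char)) : ∀ coll, pvBLoop qs coll = coll ++ qs.takeWhile pvNum := by
  induction qs with
  | nil => intro coll; simp [pvBLoop]
  | cons p rest ih =>
    intro coll
    cases h : pvNum p with
    | true =>
      obtain ⟨n, hn⟩ := pvNum_some p h
      simp [pvBLoop, hn, List.takeWhile, pvNum, ih]
    | false =>
      simp [pvBLoop, pvNum_none p h, List.takeWhile, pvNum]

lemma pvTW_len_iff {α : Type} (p : α → Bool) (l : List α) :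
    ((l.takeWhile p).length = l.length) ↔ l.takeWhile p = l := by
  constructor
  · intro h; exact (List.takeWhile_prefix _).eq_of_length h
  · intro h; rw [h]

lemma pvTW_reverse_iff {α : Type} (p : α → Bool) (l : List α) :
    (l.reverse.takeWhile p = l.reverse) ↔ l.takeWhile p = l := by
  simp only [List.takeWhile_eq_self_iff, List.mem_reverse]

lemma pvFoldA_eq (ps : List (List Char)) : ∀ init, ps.foldl pvAStep init =
    (if ps.takeWhile pvNum = ps then init else []) ++ pvRender ((ps.reverse.takeWhile pvNum).reverse) := by
  induction ps with
  | nil => intro init; simp [pvRender]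
  | cons p rest ih =>
    intro init
    have hsplit : (rest.reverse ++ [p]).takeWhile pvNum =
        if (rest.reverse.takeWhile pvNum).length = rest.reverse.length
        then rest.reverse ++ [p].takeWhile pvNum else rest.reverse.takeWhile pvNum :=
      List.takeWhile_append
    cases h : pvNum p with
    | true =>
      obtain ⟨n, hn⟩ := pvNum_some p h
      by_cases hall : rest.takeWhile pvNum = rest
      · have hrev : rest.reverse.takeWhile pvNum = rest.reverse := (pvTW_reverse_iff pvNum rest).mpr hall
        have hL : (rest.reverse.takeWhile pvNum).length = rest.reverse.length := by rw [hrev]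
        simp only [List.foldl_cons, pvAStep, hn, ih, List.reverse_cons, hsplit, if_true,
          List.takeWhile, h, hall, hrev, List.reverse_append, List.reverse_reverse]
        simp [pvRender]
      · have hrev : ¬ rest.reverse.takeWhile pvNum = rest.reverse :=
          fun hc => hall ((pvTW_reverse_iff pvNum rest).mp hc)
        have hL : ¬ (rest.reverse.takeWhile pvNum).length = rest.reverse.length :=
          fun hc => hrev ((pvTW_len_iff pvNum rest.reverse).mp hc)
        have hcons : ¬ (p :: rest).takeWhile pvNum = p :: rest := by
          simp [h, hall]
        simp only [List.foldl_cons, pvAStep, hn, ih, List.reverse_cons, hsplit, hL, if_false,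
          if_neg hall, if_neg hcons, List.nil_append]
    | false =>
      have hn := pvNum_none p h
      have hcons : ¬ (p :: rest).takeWhile pvNum = p :: rest := by
        simp [List.takeWhile, h]
      have htail : (rest.reverse ++ [p]).takeWhile pvNum = rest.reverse.takeWhile pvNum := by
        rw [hsplit]
        by_cases hL : (rest.reverse.takeWhile pvNum).length = rest.reverse.length
        · rw [if_pos hL, (pvTW_len_iff pvNum rest.reverse).mp hL]
          simp [List.takeWhile, h]
        · rw [if_neg hL]
      simp only [List.foldl_cons, pvAStep, hn, ih, List.reverse_cons, htail, if_neg hcons,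
        List.nil_append]
      split <;> rfl

lemma pvMain (ps : List (List Char)) :
    (if (ps.foldl pvAStep []).length = 0 then "equity" else String.mk (ps.foldl pvAStep [])) =
    (if pvBLoop ps.reverse [] = [] then "equity"
     else String.mk (PySem.Chars.join [] ((pvBLoop ps.reverse []).reverse.map (fun p => '_' :: p)))) := by
  have hB : pvBLoop ps.reverse [] = ps.reverse.takeWhile pvNum := by
    rw [pvBLoop_eq]; rfl
  have hA : ps.foldl pvAStep [] = pvRender ((ps.reverse.takeWhile pvNum).reverse) := by
    rw [pvFoldA_eq]; split <;> rfl
  rw [hA, hB, pvJoin_nil]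
  have hiff : (pvRender ((ps.reverse.takeWhile pvNum).reverse)).length = 0 ↔
      ps.reverse.takeWhile pvNum = [] := by
    rw [List.length_eq_zero_iff, pvRender_nil_iff, List.reverse_eq_nil_iff]
  by_cases hz : ps.reverse.takeWhile pvNum = []
  · rw [if_pos (hiff.mpr hz), if_pos hz]
  · rw [if_neg (fun hc => hz (hiff.mp hc)), if_neg hz, pvRender]

-- ===== VERDICT (by name: the statement is the Claim_ definition above) =====
theorem get_total_col_title_spec : Claim_equal_get_total_col_title := by
  intro file_name _
  unfold Spec_get_total_col_title get_total_col_title get_total_col_title_alt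
  simp only [ne_eq, ne_comm]
  exact pvMain _
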